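-- pv_equiv track=rewrite | github.com/Tomasoun/programas-musicales | detector-acorde/acorde_detector.py | calcular_intervalos
-- ===== SOURCE A (Python) =====
-- notas_cromaticas = ['C', 'C#', 'D', 'D#', 'E', 'F', 'F#', 'G', 'G#', 'A', 'A#', 'B']
--
-- def calcular_intervalos(notas_ingresadas):
--     raiz = notas_ingresadas[0]
--     indice_raiz = notas_cromaticas.index(raiz)
--     intervalos = []
--
--     for nota in notas_ingresadas:
--         diferencia = (notas_cromaticas.index(nota) - indice_raiz) % 12
--         intervalos.append(diferencia)
--
--     intervalos_ordenados = sorted(set(intervalos))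
--     return intervalos_ordenados
-- ===== SOURCE B (Python) =====
-- notas_cromaticas = ['C', 'C#', 'D', 'D#', 'E', 'F', 'F#', 'G', 'G#', 'A', 'A#', 'B']
--
-- def calcular_intervalos(notas_ingresadas):
--     raiz = notas_ingresadas[0]
--     indice_raiz = notas_cromaticas.index(raiz)
--     presentes = set(notas_ingresadas)
--     escala = notas_cromaticas[indice_raiz:] + notas_cromaticas[:indice_raiz]
--     return [i for i, nota in enumerate(escala) if nota in presentes]
-- ===== Notes on version B (the rewrite author's own statement) =====
-- stated objective: alternative
-- what changed: Instead of mapping every note to its interval and sorting the deduplicated results, B rotates the chromatic scale to start at the root and enumerates its 12 positions, emitting each position whose note occurs in the input set, so no per-note interval arithmetic and no sorted()/set-of-intervals step exist.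
import Mathlib
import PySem

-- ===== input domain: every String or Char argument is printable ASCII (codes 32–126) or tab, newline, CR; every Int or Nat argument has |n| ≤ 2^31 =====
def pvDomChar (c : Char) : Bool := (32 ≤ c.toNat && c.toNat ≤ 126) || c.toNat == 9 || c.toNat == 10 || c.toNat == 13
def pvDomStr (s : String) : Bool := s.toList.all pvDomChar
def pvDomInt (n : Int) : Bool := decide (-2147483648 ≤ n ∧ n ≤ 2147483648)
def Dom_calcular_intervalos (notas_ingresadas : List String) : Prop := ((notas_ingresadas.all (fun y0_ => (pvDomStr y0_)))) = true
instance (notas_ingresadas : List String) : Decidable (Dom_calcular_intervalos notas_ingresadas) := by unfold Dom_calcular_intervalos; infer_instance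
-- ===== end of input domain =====

-- B rotates the chromatic scale to the root and filters its 12 positions by membership of the input notes,
-- instead of mapping each note to an interval and sorting the deduplicated intervals (alternative algorithm, same cost class).

-- ===== PORT A =====
def notas_cromaticas : List String := ["C", "C#", "D", "D#", "E", "F", "F#", "G", "G#", "A", "A#", "B"]

def calcular_intervalos (notas_ingresadas : List String) : List Int :=
  let raiz := (PySem.List.pyGet? notas_ingresadas 0).getD ""
  let indice_raiz : Int := ((PySem.List.index? notas_cromaticas raiz).getD 0 : Nat)
  let intervalos : List Int := notas_ingresadas.foldl
    (fun acc nota =>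
      acc ++ [PySem.Int.mod ((((PySem.List.index? notas_cromaticas nota).getD 0 : Nat) : Int) - indice_raiz) 12])
    []
  PySem.List.sorted (PySem.Set.ofList intervalos) (fun x => x) false

-- ===== PORT B =====
def calcular_intervalos_alt (notas_ingresadas : List String) : List Int :=
  let raiz := (PySem.List.pyGet? notas_ingresadas 0).getD ""
  let indice_raiz : Int := ((PySem.List.index? notas_cromaticas raiz).getD 0 : Nat)
  let presentes : PySem.Set String := PySem.Set.ofList notas_ingresadas
  let escala := PySem.List.slice notas_cromaticas (some indice_raiz) none
             ++ PySem.List.slice notas_cromaticas none (some indice_raiz)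
  (PySem.List.enumerate escala).foldl
    (fun acc p => if p.2 ∈ presentes then acc ++ [p.1] else acc) []

-- ===== PRECONDITION & SPEC =====
-- Pre_ excludes exactly the inputs on which the Python A raises: the empty list (IndexError on
-- notas_ingresadas[0]) and lists containing a note outside the 12 chromatic names (ValueError from .index).
def Pre_calcular_intervalos (notas_ingresadas : List String) : Prop :=
  notas_ingresadas ≠ [] ∧ ∀ n ∈ notas_ingresadas, n ∈ notas_cromaticas
instance (notas_ingresadas : List String) : Decidable (Pre_calcular_intervalos notas_ingresadas) := by
  unfold Pre_calcular_intervalos; infer_instance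

def pvWitness_calcular_intervalos : List String := ["C", "E", "G"]

def Spec_calcular_intervalos (notas_ingresadas : List String) (out : List Int) : Prop := out = calcular_intervalos_alt notas_ingresadas
instance (notas_ingresadas : List String) (out : List Int) : Decidable (Spec_calcular_intervalos notas_ingresadas out) := by unfold Spec_calcular_intervalos; infer_instance

-- ===== CLAIM (what is proved, stated in full; the proofs are below) =====
def Claim_equal_calcular_intervalos : Prop := ∀ (notas_ingresadas : List String), Dom_calcular_intervalos notas_ingresadas → Pre_calcular_intervalos notas_ingresadas → Spec_calcular_intervalos notas_ingresadas (calcular_intervalos notas_ingresadas)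

-- ===== LEMMAS AND PROOFS =====

-- A's append-loop is a map.
theorem foldl_append_map (g : String → Int) (xs : List String) :
    ∀ acc : List Int, xs.foldl (fun a n => a ++ [g n]) acc = acc ++ xs.map g := by
  induction xs with
  | nil => simp
  | cons x xs ih => intro acc; simp [List.foldl_cons, ih]

-- sorted(set(vals)) of values in [0,12) is the increasing sweep of [0..11] filtered by membership.
theorem sorted_set_eq_filter_range (vals : List Int) (hv : ∀ v ∈ vals, 0 ≤ v ∧ v < 12) :
    PySem.List.sorted (PySem.Set.ofList vals) (fun x => x) false
      = (PySem.List.pyRange 0 12 1).filter (fun i => decide (i ∈ vals)) := by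
  apply PySem.List.sorted_eq_of_perm_of_pairwise_lt
  · rw [List.perm_ext_iff_of_nodup
      ((PySem.List.nodup_pyRange_one 0 12).filter _) (PySem.Set.nodup_ofList vals)]
    intro a
    simp only [List.mem_filter, PySem.List.mem_pyRange_one, PySem.Set.mem_ofList, decide_eq_true_eq]
    constructor
    · rintro ⟨_, h⟩; exact h
    · intro h; exact ⟨hv a h, h⟩
  · exact List.Pairwise.filter _ (PySem.List.pairwise_lt_pyRange_one 0 12)

-- The chromatic list indexes its own elements: index?(chrom[j]) = j for j < 12.
theorem chrom_index_self : ∀ j : Nat, j < 12 →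
    PySem.List.index? notas_cromaticas (notas_cromaticas.getD j "") = some j := by decide

theorem chrom_length : notas_cromaticas.length = 12 := by decide

-- Members of the chromatic list have an index below 12 that points back to them.
theorem chrom_mem_index (n : String) (hn : n ∈ notas_cromaticas) :
    ∃ j : Nat, PySem.List.index? notas_cromaticas n = some j ∧ j < 12 ∧ notas_cromaticas.getD j "" = n := by
  have h := (PySem.List.index?_isSome_iff (xs := notas_cromaticas) (v := n)).mpr hn
  rcases Option.isSome_iff_exists.mp h with ⟨j, hj⟩
  rcases PySem.List.getElem_of_index?_eq_some hj with ⟨hlt, hget, _⟩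
  refine ⟨j, hj, by have := chrom_length; omega, ?_⟩
  simp [List.getD, List.getElem?_eq_getElem hlt, hget]

-- Rotated-scale lookup: position jt of (drop k ++ take k) is chromatic position (k+jt) % 12.
theorem escala_getD : ∀ k < 12, ∀ jt < 12,
    ((notas_cromaticas.drop k ++ notas_cromaticas.take k).getD jt "")
      = notas_cromaticas.getD ((k + jt) % 12) "" := by decide

theorem main_eq (x : String) (xs : List String)
    (hall : ∀ n ∈ x :: xs, n ∈ notas_cromaticas) :
    calcular_intervalos (x :: xs) = calcular_intervalos_alt (x :: xs) := by
  obtain ⟨k, hk, hklt, _⟩ := chrom_mem_index x (hall x (by simp))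
  have hget : (PySem.List.pyGet? (x :: xs) 0).getD "" = x := by
    simp [PySem.List.pyGet?, PySem.List.pyIdx?]
  simp only [calcular_intervalos, calcular_intervalos_alt, hget, hk, Option.getD_some]
  -- name the per-note interval function
  set g : String → Int := fun nota =>
    PySem.Int.mod ((((PySem.List.index? notas_cromaticas nota).getD 0 : Nat) : Int) - (k : Int)) 12
    with hg
  -- A side: loop = map, then sorted(set(·)) = increasing filter of [0..11]
  rw [foldl_append_map g (x :: xs) []]
  simp only [List.nil_append]
  rw [sorted_set_eq_filter_range ((x :: xs).map g) ?hv]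
  case hv =>
    intro v hv
    rcases List.mem_map.mp hv with ⟨s, _, rfl⟩
    exact ⟨PySem.Int.mod_nonneg _ (by norm_num), PySem.Int.mod_lt _ (by norm_num)⟩
  -- B side: slices are rotate, enumerate-comprehension = filter of [0..11]
  rw [PySem.List.slice_from_natCast, PySem.List.slice_to_natCast]
  set esc : List String := notas_cromaticas.drop k ++ notas_cromaticas.take k with hesc
  have hlen : PySem.List.len esc = 12 := by
    simp [PySem.List.len, hesc, chrom_length]
    omega
  have hfun : (fun (acc : List Int) (p : Int × String) =>
        if p.2 ∈ PySem.Set.ofList (x :: xs) then acc ++ [p.1] else acc)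
      = (fun acc p => if decide (p.2 ∈ PySem.Set.ofList (x :: xs)) then acc ++ [p.1] else acc) := by
    funext acc p; simp
  rw [hfun, PySem.List.foldl_append_if, PySem.List.enumerate_eq_map_pyRange (d := ""), hlen,
      List.filter_map]
  simp only [List.map_map, Function.comp_def, List.nil_append, List.map_id']
  -- both sides are filters of pyRange 0 12: compare pointwise
  apply List.filter_congr
  intro j hj
  rcases PySem.List.mem_pyRange_one.mp hj with ⟨hj0, hj12⟩
  have hjt : j = ((j.toNat : Nat) : Int) := by omega
  have hesc_get : PySem.List.pyGetD esc j "" = notas_cromaticas.getD ((k + j.toNat) % 12) "" := by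
    rw [hjt, PySem.List.pyGetD_natCast]
    exact escala_getD k hklt j.toNat (by omega)
  rw [hesc_get]
  simp only [decide_eq_decide, PySem.Set.mem_ofList, List.mem_map]
  constructor
  · rintro ⟨n, hn, hgn⟩
    obtain ⟨jn, hjn, hjnlt, hjng⟩ := chrom_mem_index n (hall n hn)
    have hmod : PySem.Int.mod (((jn : Nat) : Int) - (k : Int)) 12 = ((jn : Int) - k) % 12 :=
      PySem.Int.mod_eq_emod_of_pos (by norm_num)
    rw [hg] at hgn
    simp only [hjn, Option.getD_some] at hgn
    rw [hmod] at hgn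
    have : (k + j.toNat) % 12 = jn := by omega
    rw [this, hjng]
    exact hn
  · intro hm
    refine ⟨notas_cromaticas.getD ((k + j.toNat) % 12) "", hm, ?_⟩
    have hjn : PySem.List.index? notas_cromaticas
        (notas_cromaticas.getD ((k + j.toNat) % 12) "") = some ((k + j.toNat) % 12) :=
      chrom_index_self _ (Nat.mod_lt _ (by norm_num))
    rw [hg]
    simp only [hjn, Option.getD_some]
    rw [PySem.Int.mod_eq_emod_of_pos (by norm_num)]
    omega

-- ===== VERDICT (by name: the statement is the Claim_ definition above) =====
theorem calcular_intervalos_spec : Claim_equal_calcular_intervalos := by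
  intro notas _ hpre
  obtain ⟨hne, hall⟩ := hpre
  match notas, hne with
  | x :: xs, _ => exact main_eq x xs hall
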